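-- pv_equiv track=rewrite | github.com/snowleopard-spec/spending_review | build_mapping.py | report_substring_overlaps
-- ===== SOURCE A (Python) =====
-- def report_substring_overlaps(mapping: dict) -> list[str]:
--     """
--     Find pairs where one partial_string is a substring of another but maps
--     to a different category. Not an error — longest-match handles it — but
--     worth surfacing so the user can confirm intent.
--     """
--     notes = []
--     keys = sorted(mapping.keys(), key=len)  # shortest first
--     for i, short in enumerate(keys):
--         for long in keys[i + 1:]:
--             if short == long:
--                 continue
--             if short in long and mapping[short] != mapping[long]:
--                 notes.append(
--                     f"  '{short}' ({mapping[short]}) is contained in "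
--                     f"'{long}' ({mapping[long]}) — longest match wins, confirm this is intended"
--                 )
--     return notes
-- ===== SOURCE B (Python) =====
-- def report_substring_overlaps(mapping: dict) -> list[str]:
--     """
--     Different algorithm: instead of testing every key pair for containment,
--     build a hash index of all keys, enumerate every substring of each key and
--     look it up in the index (the quadratic inner key scan disappears), then
--     bucket the hits by the shorter key so the report comes out in A's order.
--     """
--     ks = sorted(mapping, key=len)
--     idx = {k: n for n, k in enumerate(ks)}
--     buckets = [[] for _ in ks]
--     for j, long in enumerate(ks):
--         hits = set()
--         for a in range(len(long)):
--             for b in range(a, len(long) + 1):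
--                 i = idx.get(long[a:b])
--                 if i is not None and i != j:
--                     hits.add(i)
--         for i in hits:
--             if mapping[ks[i]] != mapping[long]:
--                 buckets[i].append(j)
--     notes = []
--     for i, short in enumerate(ks):
--         for j in buckets[i]:
--             long = ks[j]
--             notes.append(
--                 f"  '{short}' ({mapping[short]}) is contained in "
--                 f"'{long}' ({mapping[long]}) — longest match wins, confirm this is intended"
--             )
--     return notes
-- ===== Notes on version B (the rewrite author's own statement) =====
-- stated objective: alternative
-- what changed: Instead of A's quadratic all-pairs containment scan over the length-sorted keys, B builds a hash index of all keys once, probes it with every substring of every key, deduplicates the hits per key in a set and buckets them under the shorter key's index, then emits the buckets in index order to reproduce A's report order.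
import Mathlib
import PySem

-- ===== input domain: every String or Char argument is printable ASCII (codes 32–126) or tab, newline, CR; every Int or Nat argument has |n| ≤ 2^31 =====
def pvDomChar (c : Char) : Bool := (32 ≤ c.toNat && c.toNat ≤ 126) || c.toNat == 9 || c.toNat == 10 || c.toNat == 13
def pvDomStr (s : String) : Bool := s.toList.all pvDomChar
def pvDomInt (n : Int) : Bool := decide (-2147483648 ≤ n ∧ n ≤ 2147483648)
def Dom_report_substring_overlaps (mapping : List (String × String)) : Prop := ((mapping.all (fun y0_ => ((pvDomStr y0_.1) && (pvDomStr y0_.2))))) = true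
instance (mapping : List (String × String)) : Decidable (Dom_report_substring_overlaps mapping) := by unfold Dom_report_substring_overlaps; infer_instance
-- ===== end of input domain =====

-- B replaces A's quadratic all-pairs containment scan by a hash index of all keys that is probed with
-- every substring of every key, hits bucketed per shorter key to reproduce A's report order (objective: alternative).

-- ===== PORT A =====
-- the f-string of both Pythons (identical text in A and B)
def pvNote (short sv long lv : String) : String :=
  "  '" ++ short ++ "' (" ++ sv ++ ") is contained in '" ++ long ++ "' (" ++ lv
    ++ ") — longest match wins, confirm this is intended"

-- mapping[short] / mapping[long]: short and long come from mapping.keys(), so the KeyError branch is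
-- unreachable; ported as getD with an arbitrary default.
def report_substring_overlaps (mapping : List (String × String)) : List String :=
  let d := PySem.Dict.ofList mapping
  let keys := PySem.List.sorted d.keys (fun k => PySem.Str.len k)
  (PySem.List.enumerate keys).foldl (fun notes p =>
    (PySem.List.slice keys (some (p.1 + 1)) none).foldl (fun notes long =>
      if p.2 == long then notes
      else if PySem.Str.isIn p.2 long && !(d.getD p.2 "" == d.getD long "") then
        notes ++ [pvNote p.2 (d.getD p.2 "") long (d.getD long "")]
      else notes) notes) []

-- ===== PORT B =====
-- Source B: hash index 'idx' of all keys; every substring long[a:b] of every key is looked up in it;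
-- hits are deduplicated in a per-key set and bucketed under the shorter key's index.
-- ks[i] / buckets[i] indices always in range, ported as pyGetD/pySetD with an arbitrary default.
def report_substring_overlaps_alt (mapping : List (String × String)) : List String :=
  let d := PySem.Dict.ofList mapping
  let ks := PySem.List.sorted d.keys (fun k => PySem.Str.len k)
  let idx : PySem.Dict String Int :=
    (PySem.List.enumerate ks).foldl (fun m p => m.insert p.2 p.1) PySem.Dict.empty
  let buckets0 : List (List Int) := ks.map (fun _ => [])
  let buckets := (PySem.List.enumerate ks).foldl (fun bs p =>
    let hits : PySem.Set Int :=
      (PySem.List.pyRange 0 (PySem.Str.len p.2) 1).foldl (fun h a =>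
        (PySem.List.pyRange a (PySem.Str.len p.2 + 1) 1).foldl (fun h b =>
          match idx.get? (PySem.Str.slice p.2 (some a) (some b)) with
          | some i => if i ≠ p.1 then PySem.Set.add h i else h
          | none => h) h) PySem.Set.empty
    hits.foldl (fun bs i =>
      if !(d.getD (PySem.List.pyGetD ks i "") "" == d.getD p.2 "") then
        PySem.List.pySetD bs i (PySem.List.pyGetD bs i [] ++ [p.1])
      else bs) bs) buckets0
  (PySem.List.enumerate ks).foldl (fun notes p =>
    (PySem.List.pyGetD buckets p.1 []).foldl (fun notes j =>
      notes ++ [pvNote p.2 (d.getD p.2 "")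
        (PySem.List.pyGetD ks j "") (d.getD (PySem.List.pyGetD ks j "") "")]) notes) []

-- ===== PRECONDITION & SPEC =====
def Spec_report_substring_overlaps (mapping : List (String × String)) (out : List String) : Prop := out = report_substring_overlaps_alt mapping
instance (mapping : List (String × String)) (out : List String) : Decidable (Spec_report_substring_overlaps mapping out) := by unfold Spec_report_substring_overlaps; infer_instance

-- ===== CLAIM =====
def Claim_equal_report_substring_overlaps : Prop := ∀ (mapping : List (String × String)), Dom_report_substring_overlaps mapping → Spec_report_substring_overlaps mapping (report_substring_overlaps mapping)

-- ===== LEMMAS AND PROOFS =====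

-- the key at index j of the sorted key list (the value both programs read there)
def pvG (ks : List String) (j : Nat) : String := ks.getD j ""
-- the category of that key
def pvCat (d : PySem.Dict String String) (ks : List String) (j : Nat) : String := d.getD (pvG ks j) ""
-- A's merged inner-loop test (short ≠ long, containment, different category)
def pvP (d : PySem.Dict String String) (ks : List String) (i j : Nat) : Bool :=
  !(pvG ks i == pvG ks j) && (PySem.Str.isIn (pvG ks i) (pvG ks j) && !(pvCat d ks i == pvCat d ks j))
def pvNoteIJ (d : PySem.Dict String String) (ks : List String) (i j : Nat) : String :=
  pvNote (pvG ks i) (pvCat d ks i) (pvG ks j) (pvCat d ks j)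
-- the common middle form both ports are reduced to
def pvM (d : PySem.Dict String String) (ks : List String) : List String :=
  (List.range ks.length).flatMap (fun i =>
    ((List.range ks.length).filter (fun j => decide (i < j) && pvP d ks i j)).map
      (fun j => pvNoteIJ d ks i j))

theorem pv_map_g (ks : List String) : (List.range ks.length).map (fun j => pvG ks j) = ks := by
  apply List.ext_getElem
  · simp
  · intro i h1 h2
    simp [pvG, List.getD_eq_getElem?_getD, List.getElem?_eq_getElem h2]

theorem pv_drop_range_filter (n k : Nat) :
    (List.range n).drop k = (List.range n).filter (fun j => decide (k ≤ j)) := by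
  induction n with
  | zero => simp
  | succ n ih =>
    rw [List.range_succ, List.filter_append]
    by_cases hk : k ≤ n
    · rw [List.drop_append_of_le_length (by simpa using hk), ih]
      simp [hk]
    · rw [List.drop_eq_nil_of_le (by simp; omega)]
      rw [List.filter_eq_nil_iff.mpr (by simp; omega),
        List.filter_eq_nil_iff.mpr (by intro j hj; simp at hj ⊢; omega)]
      simp

-- A's inner loop over keys[i+1:], written as filter-then-map over the remaining keys
def pvGi (d : PySem.Dict String String) (ks : List String) (i : Nat) : List String :=
  ((ks.drop (i + 1)).filter (fun long =>
      !(pvG ks i == long) && (PySem.Str.isIn (pvG ks i) long && !(pvCat d ks i == d.getD long "")))).map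
    (fun long => pvNote (pvG ks i) (pvCat d ks i) long (d.getD long ""))

theorem pvA_inner (d : PySem.Dict String String) (ks : List String) (i : Nat) (acc : List String) :
    (ks.drop (i + 1)).foldl (fun notes long =>
        if pvG ks i == long then notes
        else if PySem.Str.isIn (pvG ks i) long && !(d.getD (pvG ks i) "" == d.getD long "") then
          notes ++ [pvNote (pvG ks i) (d.getD (pvG ks i) "") long (d.getD long "")]
        else notes) acc = acc ++ pvGi d ks i := by
  unfold pvGi
  rw [← PySem.List.foldl_append_if]
  apply PySem.List.foldl_congr_mem
  intro a long _
  by_cases h : pvG ks i = long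
  · simp [h, pvCat]
  · simp only [pvCat]
    simp [h]

theorem pvA_eq (mapping : List (String × String)) :
    report_substring_overlaps mapping =
      pvM (PySem.Dict.ofList mapping)
        (PySem.List.sorted (PySem.Dict.ofList mapping).keys (fun k => PySem.Str.len k)) := by
  simp only [report_substring_overlaps]
  set d := PySem.Dict.ofList mapping with hd
  set ks := PySem.List.sorted d.keys (fun k => PySem.Str.len k) with hks
  rw [PySem.List.enumerate_eq_map_pyRange ks "", List.foldl_map, PySem.List.len_eq,
    PySem.List.pyRange_zero_nat, List.foldl_map]
  have hstep : ∀ (acc : List String) (i : Nat), i ∈ List.range ks.length →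
      (PySem.List.slice ks (some ((((i : Nat) : Int), PySem.List.pyGetD ks ((i : Nat) : Int) "").1 + 1)) none).foldl
        (fun notes long =>
          if (((i : Nat) : Int), PySem.List.pyGetD ks ((i : Nat) : Int) "").2 == long then notes
          else if PySem.Str.isIn (((i : Nat) : Int), PySem.List.pyGetD ks ((i : Nat) : Int) "").2 long &&
              !(d.getD (((i : Nat) : Int), PySem.List.pyGetD ks ((i : Nat) : Int) "").2 "" == d.getD long "") then
            notes ++ [pvNote (((i : Nat) : Int), PySem.List.pyGetD ks ((i : Nat) : Int) "").2
              (d.getD (((i : Nat) : Int), PySem.List.pyGetD ks ((i : Nat) : Int) "").2 "") long (d.getD long "")]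
          else notes) acc = acc ++ pvGi d ks i := by
    intro acc i _
    have hc : ((i : Nat) : Int) + 1 = (((i + 1 : Nat)) : Int) := by push_cast; ring
    have hg : PySem.List.pyGetD ks ((i : Nat) : Int) "" = pvG ks i := by
      simp [pvG]
    dsimp only
    rw [hc, PySem.List.slice_from_natCast, hg]
    exact pvA_inner d ks i acc
  calc (List.range ks.length).foldl _ []
      = (List.range ks.length).foldl (fun acc i => acc ++ pvGi d ks i) [] := by
        apply PySem.List.foldl_congr_mem
        intro acc i hi
        exact hstep acc i hi
    _ = (List.range ks.length).flatMap (fun i => pvGi d ks i) := by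
        rw [PySem.List.foldl_append_eq_flatMap]; simp
    _ = pvM d ks := by
        unfold pvM
        rw [List.flatMap_def, List.flatMap_def]
        congr 1
        apply List.map_congr_left
        intro i _
        unfold pvGi
        conv_lhs => rw [show ks.drop (i + 1) = ((List.range ks.length).map (fun j => pvG ks j)).drop (i + 1) from by rw [pv_map_g]]
        rw [← List.map_drop, List.filter_map, List.map_map, pv_drop_range_filter, List.filter_filter]
        congr 1
        apply List.filter_congr
        intro j _
        simp only [Function.comp]
        rw [show (decide (i + 1 ≤ j)) = (decide (i < j)) from decide_eq_decide.mpr (by omega), Bool.and_comm]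
        rfl

-- B's per-key hit set (the inline 'hits' loop of the port, named for the proofs)
def pvHits (idx : PySem.Dict String Int) (long : String) (jI : Int) : PySem.Set Int :=
  (PySem.List.pyRange 0 (PySem.Str.len long) 1).foldl (fun h a =>
    (PySem.List.pyRange a (PySem.Str.len long + 1) 1).foldl (fun h b =>
      match idx.get? (PySem.Str.slice long (some a) (some b)) with
      | some i => if i ≠ jI then PySem.Set.add h i else h
      | none => h) h) PySem.Set.empty

-- one outer-loop step of B's bucket-filling phase, and the per-pair condition it implements
def pvStep (d : PySem.Dict String String) (ks : List String) (idx : PySem.Dict String Int)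
    (bs : List (List Int)) (j : Nat) : List (List Int) :=
  (pvHits idx (pvG ks j) (j : Int)).foldl (fun bs i =>
    if !(d.getD (PySem.List.pyGetD ks i "") "" == d.getD (pvG ks j) "") then
      PySem.List.pySetD bs i (PySem.List.pyGetD bs i [] ++ [(j : Int)])
    else bs) bs

def pvCondB (d : PySem.Dict String String) (ks : List String) (idx : PySem.Dict String Int)
    (i j : Nat) : Bool :=
  decide ((i : Int) ∈ pvHits idx (pvG ks j) (j : Int) ∧
    (!(d.getD (PySem.List.pyGetD ks (i : Int) "") "" == d.getD (pvG ks j) "")) = true)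

-- the index dict looks a key up to exactly its position in the duplicate-free key list
theorem pvIdx_get (ks : List String) (hnd : ks.Nodup) (s : String) (v : Int) :
    ((PySem.List.enumerate ks).foldl (fun m p => m.insert p.2 p.1) PySem.Dict.empty).get? s = some v ↔
      ∃ k, ∃ _ : k < ks.length, s = ks[k] ∧ v = (k : Int) := by
  have hkeysnd : ((PySem.List.enumerate ks).foldl (fun m p => m.insert p.2 p.1)
      (PySem.Dict.empty (κ := String) (ν := Int))).keys.Nodup :=
    PySem.Dict.nodup_keys_foldl_insert_key (PySem.List.enumerate ks) (fun p => p.2)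
      (fun _ p => p.1) PySem.Dict.empty (PySem.Dict.nodup_keys_empty)
  rw [PySem.Dict.get?_eq_some_iff_mem_items _ _ _ hkeysnd]
  rw [PySem.Dict.items_foldl_insert_fresh (PySem.List.enumerate ks) (fun p => p.2) (fun p => p.1)
      PySem.Dict.empty (fun a _ => PySem.Dict.contains_empty _)
      (by rw [PySem.List.map_snd_enumerate]; exact hnd)]
  rw [show (PySem.Dict.empty (κ := String) (ν := Int)).items = [] from rfl]
  rw [List.nil_append, List.mem_map]
  constructor
  · rintro ⟨p, hp, he⟩
    rw [PySem.List.mem_enumerate_iff] at hp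
    obtain ⟨k, hk, rfl⟩ := hp
    refine ⟨k, hk, ?_, ?_⟩
    · exact (congrArg Prod.fst he).symm
    · have := (congrArg Prod.snd he).symm
      simpa using this
  · rintro ⟨k, hk, rfl, rfl⟩
    refine ⟨((0 : Int) + (k : Int), ks[k]), ?_, by simp⟩
    rw [PySem.List.mem_enumerate_iff]
    exact ⟨k, hk, rfl⟩

theorem pvMem_inner (f : Int → Option Int) (jI : Int) (l : List Int) :
    ∀ (h0 : PySem.Set Int) (x : Int),
      (x ∈ l.foldl (fun h b => match f b with
        | some i => if i ≠ jI then PySem.Set.add h i else h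
        | none => h) h0) ↔ x ∈ h0 ∨ ∃ b ∈ l, f b = some x ∧ x ≠ jI := by
  induction l with
  | nil => intro h0 x; simp
  | cons b t ih =>
    intro h0 x
    rw [List.foldl_cons]
    cases hfb : f b with
    | none =>
      rw [ih]
      constructor
      · rintro (h | ⟨b', hb', h1, h2⟩)
        · exact Or.inl h
        · exact Or.inr ⟨b', List.mem_cons_of_mem _ hb', h1, h2⟩
      · rintro (h | ⟨b', hb', h1, h2⟩)
        · exact Or.inl h
        · rcases List.mem_cons.mp hb' with rfl | hb'
          · rw [hfb] at h1; cases h1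
          · exact Or.inr ⟨b', hb', h1, h2⟩
    | some i =>
      dsimp only
      by_cases hij : i ≠ jI
      · rw [if_pos hij, ih]
        constructor
        · rintro (h | ⟨b', hb', h1, h2⟩)
          · rcases (PySem.Set.mem_add h0 i x).mp h with h | rfl
            · exact Or.inl h
            · exact Or.inr ⟨b, List.mem_cons_self, hfb, hij⟩
          · exact Or.inr ⟨b', List.mem_cons_of_mem _ hb', h1, h2⟩
        · rintro (h | ⟨b', hb', h1, h2⟩)
          · exact Or.inl ((PySem.Set.mem_add h0 i x).mpr (Or.inl h))
          · rcases List.mem_cons.mp hb' with rfl | hb'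
            · rw [hfb] at h1
              injection h1 with h1
              exact Or.inl ((PySem.Set.mem_add h0 i x).mpr (Or.inr h1.symm))
            · exact Or.inr ⟨b', hb', h1, h2⟩
      · rw [if_neg hij, ih]
        rw [not_not] at hij
        constructor
        · rintro (h | ⟨b', hb', h1, h2⟩)
          · exact Or.inl h
          · exact Or.inr ⟨b', List.mem_cons_of_mem _ hb', h1, h2⟩
        · rintro (h | ⟨b', hb', h1, h2⟩)
          · exact Or.inl h
          · rcases List.mem_cons.mp hb' with rfl | hb'
            · rw [hfb] at h1
              injection h1 with h1
              exact absurd (h1 ▸ hij) h2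
            · exact Or.inr ⟨b', hb', h1, h2⟩

theorem pvMem_outer (F : PySem.Set Int → Int → PySem.Set Int) (C : Int → Int → Prop)
    (hF : ∀ h a x, x ∈ F h a ↔ x ∈ h ∨ C a x) (l : List Int) :
    ∀ (h0 : PySem.Set Int) (x : Int), x ∈ l.foldl F h0 ↔ x ∈ h0 ∨ ∃ a ∈ l, C a x := by
  induction l with
  | nil => intro h0 x; simp
  | cons a t ih =>
    intro h0 x
    rw [List.foldl_cons, ih, hF]
    constructor
    · rintro ((h | hc) | ⟨a', ha', hc⟩)
      exacts [Or.inl h, Or.inr ⟨a, List.mem_cons_self, hc⟩,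
        Or.inr ⟨a', List.mem_cons_of_mem _ ha', hc⟩]
    · rintro (h | ⟨a', ha', hc⟩)
      · exact Or.inl (Or.inl h)
      · rcases List.mem_cons.mp ha' with rfl | ha'
        · exact Or.inl (Or.inr hc)
        · exact Or.inr ⟨a', ha', hc⟩

theorem pvNodup_foldl {α : Type} (F : PySem.Set Int → α → PySem.Set Int)
    (hF : ∀ h a, h.Nodup → (F h a).Nodup) (l : List α) :
    ∀ h0, h0.Nodup → (l.foldl F h0).Nodup := by
  induction l with
  | nil => intro h0 h; exact h
  | cons a t ih => intro h0 h; exact ih _ (hF h0 a h)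

theorem pvNodup_hits (idx : PySem.Dict String Int) (long : String) (jI : Int) :
    (pvHits idx long jI).Nodup := by
  unfold pvHits
  apply pvNodup_foldl
  · intro h a hnd
    apply pvNodup_foldl
    · intro h' b hnd'
      cases hx : idx.get? (PySem.Str.slice long (some a) (some b)) with
      | none => simpa using hnd'
      | some i =>
        simp only [hx]
        split
        · exact PySem.Set.nodup_add h' i hnd'
        · exact hnd'
    · exact hnd
  · exact List.nodup_nil

theorem pvMem_hits (idx : PySem.Dict String Int) (long : String) (jI x : Int) :
    x ∈ pvHits idx long jI ↔
      ((∃ a b : Int, 0 ≤ a ∧ a < PySem.Str.len long ∧ a ≤ b ∧ b ≤ PySem.Str.len long ∧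
        idx.get? (PySem.Str.slice long (some a) (some b)) = some x) ∧ x ≠ jI) := by
  unfold pvHits
  rw [pvMem_outer _ (fun a x => ∃ b ∈ PySem.List.pyRange a (PySem.Str.len long + 1) 1,
      idx.get? (PySem.Str.slice long (some a) (some b)) = some x ∧ x ≠ jI)
    (fun h a x => pvMem_inner (fun b => idx.get? (PySem.Str.slice long (some a) (some b))) jI _ h x)]
  simp only [PySem.Set.empty, List.not_mem_nil, false_or, PySem.List.mem_pyRange_one]
  constructor
  · rintro ⟨a, ⟨ha0, haL⟩, b, ⟨hab, hbL⟩, h1, h2⟩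
    exact ⟨⟨a, b, ha0, haL, hab, by omega, h1⟩, h2⟩
  · rintro ⟨⟨a, b, ha0, haL, hab, hbL, h1⟩, h2⟩
    exact ⟨a, ⟨ha0, haL⟩, b, ⟨hab, by omega⟩, h1, h2⟩

theorem pvStep_getD (jv : Int) (P : Int → Bool) (hs : List Int) :
    hs.Nodup →
      ∀ (bs : List (List Int)), (∀ x ∈ hs, 0 ≤ x ∧ x.toNat < bs.length) →
        ((hs.foldl (fun bs i => if P i then PySem.List.pySetD bs i (PySem.List.pyGetD bs i [] ++ [jv]) else bs) bs).length = bs.length ∧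
          ∀ i : Nat, i < bs.length →
            (hs.foldl (fun bs i => if P i then PySem.List.pySetD bs i (PySem.List.pyGetD bs i [] ++ [jv]) else bs) bs).getD i [] =
              if ((i : Int) ∈ hs ∧ P (i : Int) = true) then bs.getD i [] ++ [jv] else bs.getD i []) := by
  induction hs with
  | nil =>
    intro _ bs _
    refine ⟨rfl, fun i h => by simp⟩
  | cons x t ih =>
    intro hnd bs hbound
    obtain ⟨hx0, hxlt⟩ := hbound x List.mem_cons_self
    obtain ⟨hxt, htnd⟩ := List.nodup_cons.mp hnd
    rw [List.foldl_cons]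
    set bs' : List (List Int) :=
      if P x = true then PySem.List.pySetD bs x (PySem.List.pyGetD bs x [] ++ [jv]) else bs with hbs'
    have hlen' : bs'.length = bs.length := by
      rw [hbs']; split
      · exact PySem.List.length_pySetD bs x _
      · rfl
    have hgetD' : ∀ i : Nat, i < bs.length → bs'.getD i [] =
        if ((i : Int) = x ∧ P x = true) then bs.getD i [] ++ [jv] else bs.getD i [] := by
      intro i hi
      rw [hbs']
      by_cases hp : P x = true
      · rw [if_pos hp, PySem.List.pySetD_of_nonneg _ _ hx0]
        rw [List.getD_eq_getElem _ _ (by simpa using hi), List.getD_eq_getElem _ _ hi,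
          List.getElem_set]
        have hxx : PySem.List.pyGetD bs x [] = bs[x.toNat] :=
          PySem.List.pyGetD_eq_getElem bs [] hx0 (by omega)
        by_cases hix : x.toNat = i
        · rw [if_pos hix, if_pos ⟨by omega, hp⟩, hxx]
          subst hix
          rfl
        · rw [if_neg hix, if_neg (by rintro ⟨h, _⟩; exact hix (by omega))]
      · simp only [Bool.not_eq_true] at hp
        rw [if_neg (by simp [hp]), if_neg (by simp [hp])]
    have hbound' : ∀ y ∈ t, 0 ≤ y ∧ y.toNat < bs'.length := by
      intro y hy
      rw [hlen']
      exact hbound y (List.mem_cons_of_mem _ hy)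
    obtain ⟨hlenF, hgetF⟩ := ih htnd bs' hbound'
    refine ⟨by rw [hlenF, hlen'], ?_⟩
    intro i hi
    rw [hgetF i (by rw [hlen']; exact hi)]
    by_cases hmt : (i : Int) ∈ t
    · have hix : ¬ (i : Int) = x := fun h => hxt (h ▸ hmt)
      have hbseq : bs'.getD i [] = bs.getD i [] := by
        rw [hgetD' i hi, if_neg (by tauto)]
      rw [hbseq]
      by_cases hp2 : P (i : Int) = true
      · rw [if_pos ⟨hmt, hp2⟩, if_pos ⟨List.mem_cons_of_mem _ hmt, hp2⟩]
      · rw [if_neg (by tauto), if_neg (by tauto)]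
    · rw [if_neg (by tauto), hgetD' i hi]
      by_cases hix : (i : Int) = x
      · by_cases hp2 : P x = true
        · rw [if_pos ⟨hix, hp2⟩, if_pos ⟨List.mem_cons.mpr (Or.inl hix), by rwa [hix]⟩]
        · have hnot2 : ¬ ((i : Int) ∈ x :: t ∧ P (i : Int) = true) := by
            rintro ⟨_, h⟩; rw [hix] at h; exact hp2 h
          rw [if_neg (by tauto), if_neg hnot2]
      · have hnot : ¬ ((i : Int) ∈ x :: t ∧ P (i : Int) = true) := by
          rintro ⟨h, _⟩
          rcases List.mem_cons.mp h with h | h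
          · exact hix h
          · exact hmt h
        rw [if_neg (by tauto), if_neg hnot]

theorem pvSorted_len_mono (xs : List String) (p q : Nat) (hpq : p ≤ q)
    (hq : q < (PySem.List.sorted xs (fun k => PySem.Str.len k)).length) :
    PySem.Str.len ((PySem.List.sorted xs (fun k => PySem.Str.len k)).getD p "") ≤
      PySem.Str.len ((PySem.List.sorted xs (fun k => PySem.Str.len k)).getD q "") := by
  rw [List.getD_eq_getElem _ _ (lt_of_le_of_lt (by omega) hq), List.getD_eq_getElem _ _ hq]
  exact PySem.List.key_sorted_getElem_mono xs (fun k => PySem.Str.len k) hpq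
    (by simpa [PySem.List.length_sorted] using hq)

-- a string is a slice long[a:b] (for in-loop bounds a, b) iff it is contained in long, provided it
-- is not long itself
theorem pvSlice_iff (s long : String) (hne : s ≠ long) :
    (∃ a b : Int, 0 ≤ a ∧ a < PySem.Str.len long ∧ a ≤ b ∧ b ≤ PySem.Str.len long ∧
      PySem.Str.slice long (some a) (some b) = s) ↔ PySem.Str.isIn s long = true := by
  rw [PySem.Str.isIn_iff_infix]
  constructor
  · rintro ⟨a, b, ha0, haL, hab, hbL, hs⟩
    have hsl : (PySem.Str.slice long (some a) (some b)).toList =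
        (long.toList.drop a.toNat).take (b.toNat - a.toNat) := by
      rw [PySem.Str.toList_slice, PySem.Chars.slice_eq_listSlice,
        PySem.List.slice_toNat _ ha0 (le_trans ha0 hab)]
    rw [hs] at hsl
    rw [hsl]
    exact ((List.take_prefix _ _).isInfix).trans ((List.drop_suffix _ _).isInfix)
  · intro hinf
    obtain ⟨u, v, huv⟩ := hinf
    have hlenuv : u.length + s.toList.length + v.length = long.toList.length := by
      rw [← huv]; simp; omega
    by_cases hnil : s.toList = []
    · have hlne : long.toList ≠ [] := by
        intro h
        apply hne
        apply String.toList_inj.mp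
        rw [hnil, h]
      have hlpos : 0 < long.toList.length := by
        cases h : long.toList with
        | nil => exact absurd h hlne
        | cons _ _ => simp
      refine ⟨0, 0, le_refl _, by rw [PySem.Str.len_eq]; omega, le_refl _,
        by rw [PySem.Str.len_eq]; omega, ?_⟩
      apply String.toList_inj.mp
      rw [PySem.Str.toList_slice, PySem.Chars.slice_eq_listSlice,
        PySem.List.slice_toNat _ (le_refl _) (le_refl _)]
      simp [hnil]
    · have hs1 : 1 ≤ s.toList.length := by
        cases hsl : s.toList with
        | nil => exact absurd hsl hnil
        | cons _ _ => simp
      refine ⟨(u.length : Int), ((u.length + s.toList.length : Nat) : Int),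
        Int.natCast_nonneg _, by rw [PySem.Str.len_eq]; push_cast; omega,
        by omega, by rw [PySem.Str.len_eq]; push_cast; omega, ?_⟩
      apply String.toList_inj.mp
      rw [PySem.Str.toList_slice, PySem.Chars.slice_eq_listSlice,
        PySem.List.slice_toNat _ (Int.natCast_nonneg _) (Int.natCast_nonneg _)]
      rw [← huv]
      rw [Int.toNat_natCast, Int.toNat_natCast]
      rw [show u.length + s.toList.length - u.length = s.toList.length from by omega]
      rw [show u ++ s.toList ++ v = u ++ (s.toList ++ v) from by simp]
      rw [List.drop_left, List.take_left]

-- the bucket array after the first m keys have been processed: bucket i holds exactly the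
-- ascending indices j < m whose hit set contains i with differing categories
theorem pvBuckets_char (d : PySem.Dict String String) (ks : List String) (idx : PySem.Dict String Int)
    (hb : ∀ j, j < ks.length → ∀ x ∈ pvHits idx (pvG ks j) (j : Int), 0 ≤ x ∧ x.toNat < ks.length) :
    ∀ m, m ≤ ks.length →
      (((List.range m).foldl (pvStep d ks idx) (ks.map (fun _ => ([] : List Int)))).length = ks.length ∧
        ∀ i : Nat, i < ks.length →
          ((List.range m).foldl (pvStep d ks idx) (ks.map (fun _ => ([] : List Int)))).getD i [] =
            ((List.range m).filter (pvCondB d ks idx i)).map (fun (j : Nat) => (j : Int))) := by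
  intro m
  induction m with
  | zero =>
    intro _
    refine ⟨by simp, ?_⟩
    intro i hi
    simp only [List.range_zero, List.foldl_nil, List.filter_nil, List.map_nil]
    rw [List.getD_eq_getElem _ _ (by simpa using hi)]
    simp
  | succ m ih =>
    intro hm
    obtain ⟨hlen, hget⟩ := ih (by omega)
    rw [List.range_succ, List.foldl_append, List.foldl_cons, List.foldl_nil]
    have hunf : ∀ bs : List (List Int), pvStep d ks idx bs m =
        (pvHits idx (pvG ks m) ((m : Nat) : Int)).foldl (fun bs i =>
          if !(d.getD (PySem.List.pyGetD ks i "") "" == d.getD (pvG ks m) "") then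
            PySem.List.pySetD bs i (PySem.List.pyGetD bs i [] ++ [((m : Nat) : Int)])
          else bs) bs := fun _ => rfl
    rw [hunf]
    obtain ⟨hl2, hg2⟩ := pvStep_getD ((m : Nat) : Int)
      (fun i => !(d.getD (PySem.List.pyGetD ks i "") "" == d.getD (pvG ks m) ""))
      (pvHits idx (pvG ks m) ((m : Nat) : Int)) (pvNodup_hits idx (pvG ks m) _)
      ((List.range m).foldl (pvStep d ks idx) (ks.map (fun _ => ([] : List Int))))
      (by intro x hx; rw [hlen]; exact hb m (by omega) x hx)
    refine ⟨by rw [hl2, hlen], ?_⟩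
    intro i hi
    rw [hg2 i (by rw [hlen]; exact hi), hget i hi, List.filter_append, List.map_append]
    by_cases hc : ((i : Int) ∈ pvHits idx (pvG ks m) ((m : Nat) : Int) ∧
        (!(d.getD (PySem.List.pyGetD ks (i : Int) "") "" == d.getD (pvG ks m) "")) = true)
    · rw [if_pos hc]
      have hdec : pvCondB d ks idx i m = true := by unfold pvCondB; exact decide_eq_true hc
      rw [List.filter_cons, List.filter_nil, hdec, if_pos rfl, List.map_cons, List.map_nil]
    · rw [if_neg hc]
      have hdec : pvCondB d ks idx i m = false := by unfold pvCondB; exact decide_eq_false hc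
      rw [List.filter_cons, List.filter_nil, hdec, if_neg (by simp), List.map_nil,
        List.append_nil]

theorem pvB_eq (mapping : List (String × String)) :
    report_substring_overlaps_alt mapping =
      pvM (PySem.Dict.ofList mapping)
        (PySem.List.sorted (PySem.Dict.ofList mapping).keys (fun k => PySem.Str.len k)) := by
  simp only [report_substring_overlaps_alt]
  set d := PySem.Dict.ofList mapping with hd
  set ks := PySem.List.sorted d.keys (fun k => PySem.Str.len k) with hks
  set idx := (PySem.List.enumerate ks).foldl (fun m p => m.insert p.2 p.1)
    (PySem.Dict.empty (κ := String) (ν := Int)) with hidx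
  set B0 := (PySem.List.enumerate ks).foldl (fun bs p =>
      ((PySem.List.pyRange 0 (PySem.Str.len p.2) 1).foldl (fun h a =>
        (PySem.List.pyRange a (PySem.Str.len p.2 + 1) 1).foldl (fun h b =>
          match idx.get? (PySem.Str.slice p.2 (some a) (some b)) with
          | some i => if i ≠ p.1 then PySem.Set.add h i else h
          | none => h) h) PySem.Set.empty).foldl (fun bs i =>
        if !(d.getD (PySem.List.pyGetD ks i "") "" == d.getD p.2 "") then
          PySem.List.pySetD bs i (PySem.List.pyGetD bs i [] ++ [p.1])
        else bs) bs) (ks.map (fun _ => ([] : List Int))) with hB0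
  have hnd : ks.Nodup := by
    rw [hks]
    exact (PySem.List.sorted_perm d.keys (fun k => PySem.Str.len k) false).symm.nodup
      (PySem.Dict.nodup_keys_ofList mapping)
  have hmono : ∀ p q : Nat, p ≤ q → q < ks.length →
      PySem.Str.len (pvG ks p) ≤ PySem.Str.len (pvG ks q) := by
    intro p q hpq hq
    unfold pvG
    rw [hks] at hq ⊢
    exact pvSorted_len_mono d.keys p q hpq hq
  have hidxget : ∀ (s : String) (v : Int), idx.get? s = some v ↔
      ∃ k, ∃ _ : k < ks.length, s = ks[k] ∧ v = (k : Int) := by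
    intro s v
    rw [hidx]
    exact pvIdx_get ks hnd s v
  have hbound : ∀ j, j < ks.length → ∀ x ∈ pvHits idx (pvG ks j) (j : Int),
      0 ≤ x ∧ x.toNat < ks.length := by
    intro j hj x hx
    rw [pvMem_hits] at hx
    obtain ⟨⟨a, b, _, _, _, _, hsome⟩, _⟩ := hx
    rw [hidxget] at hsome
    obtain ⟨k, hk, _, rfl⟩ := hsome
    constructor
    · exact Int.natCast_nonneg _
    · simpa using hk
  have hB0r : B0 = (List.range ks.length).foldl (pvStep d ks idx)
      (ks.map (fun _ => ([] : List Int))) := by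
    rw [hB0, PySem.List.enumerate_eq_map_pyRange ks "", List.foldl_map, PySem.List.len_eq,
      PySem.List.pyRange_zero_nat, List.foldl_map]
    apply PySem.List.foldl_congr_mem
    intro bs j _
    dsimp only
    rw [show PySem.List.pyGetD ks ((j : Nat) : Int) "" = pvG ks j from by simp [pvG]]
    rfl
  have hcond : ∀ i, i < ks.length → ∀ j, j < ks.length →
      pvCondB d ks idx i j = (decide (i < j) && pvP d ks i j) := by
    intro i hi j hj
    unfold pvCondB
    rw [Bool.eq_iff_iff]
    simp only [decide_eq_true_eq, Bool.and_eq_true, decide_eq_true_eq]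
    rw [pvMem_hits]
    rw [show PySem.List.pyGetD ks ((i : Nat) : Int) "" = pvG ks i from by simp [pvG]]
    have hgi : pvG ks i = ks[i] := List.getD_eq_getElem ks "" hi
    have hgj : pvG ks j = ks[j] := List.getD_eq_getElem ks "" hj
    constructor
    · rintro ⟨⟨⟨a, b, ha0, haL, hab, hbL, hsome⟩, hij⟩, hcat⟩
      rw [hidxget] at hsome
      obtain ⟨k, hk, hsl, hik⟩ := hsome
      have hki : i = k := by omega
      subst hki
      have hij' : i ≠ j := fun h => hij (by rw [h])
      have hne : pvG ks i ≠ pvG ks j := by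
        intro h
        apply hij'
        have h1 : ks[i] = ks[j] := by rw [← hgi, ← hgj]; exact h
        exact (List.Nodup.getElem_inj_iff hnd).mp h1
      have hisin : PySem.Str.isIn (pvG ks i) (pvG ks j) = true := by
        rw [← pvSlice_iff _ _ hne]
        exact ⟨a, b, ha0, haL, hab, hbL, by rw [hsl, ← hgi]⟩
      have hlen : PySem.Str.len (pvG ks i) < PySem.Str.len (pvG ks j) := by
        have hinf := (PySem.Str.isIn_iff_infix _ _).mp hisin
        have hle := List.IsInfix.length_le hinf
        have hne2 : (pvG ks i).toList.length ≠ (pvG ks j).toList.length := by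
          intro h
          exact hne (String.toList_inj.mp (hinf.eq_of_length h))
        rw [PySem.Str.len_eq, PySem.Str.len_eq]
        omega
      have hij2 : i < j := by
        by_contra hle2
        have := hmono j i (by omega) hi
        omega
      refine ⟨hij2, ?_⟩
      unfold pvP
      rw [Bool.and_eq_true, Bool.and_eq_true]
      exact ⟨by simp [hne], hisin, hcat⟩
    · rintro ⟨hij2, hP⟩
      unfold pvP at hP
      rw [Bool.and_eq_true, Bool.and_eq_true] at hP
      obtain ⟨hneb, hisin, hcat⟩ := hP
      have hne : pvG ks i ≠ pvG ks j := by simpa using hneb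
      obtain ⟨a, b, ha0, haL, hab, hbL, hsl⟩ := (pvSlice_iff _ _ hne).mpr hisin
      refine ⟨⟨⟨a, b, ha0, haL, hab, hbL, ?_⟩, by omega⟩, hcat⟩
      rw [hidxget]
      exact ⟨i, hi, by rw [hsl, hgi], rfl⟩
  obtain ⟨hBlen, hBget⟩ := pvBuckets_char d ks idx hbound ks.length le_rfl
  rw [PySem.List.enumerate_eq_map_pyRange ks "", List.foldl_map, PySem.List.len_eq,
    PySem.List.pyRange_zero_nat, List.foldl_map]
  calc (List.range ks.length).foldl _ []
      = (List.range ks.length).foldl (fun notes i => notes ++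
          (PySem.List.pyGetD B0 ((i : Nat) : Int) []).map (fun jI =>
            pvNote (PySem.List.pyGetD ks ((i : Nat) : Int) "")
              (d.getD (PySem.List.pyGetD ks ((i : Nat) : Int) "") "")
              (PySem.List.pyGetD ks jI "") (d.getD (PySem.List.pyGetD ks jI "") ""))) [] := by
        apply PySem.List.foldl_congr_mem
        intro acc i _
        dsimp only
        rw [PySem.List.foldl_append_singleton_eq_map]
    _ = pvM d ks := by
        rw [PySem.List.foldl_append_eq_flatMap, List.nil_append]
        unfold pvM
        rw [List.flatMap_def, List.flatMap_def]
        congr 1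
        apply List.map_congr_left
        intro i hi
        have hi' : i < ks.length := by simpa using hi
        rw [show PySem.List.pyGetD B0 ((i : Nat) : Int) [] = B0.getD i [] from by simp,
          hB0r, hBget i hi', List.map_map,
          List.filter_congr (fun j hj => hcond i hi' j (by simpa using hj))]
        apply List.map_congr_left
        intro j hj
        simp [pvNoteIJ, pvG, pvCat]

-- ===== VERDICT =====
theorem report_substring_overlaps_spec : Claim_equal_report_substring_overlaps := by
  intro mapping _
  unfold Spec_report_substring_overlaps
  rw [pvA_eq, pvB_eq]
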